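-- pv_equiv track=rewrite | github.com/cloudera/hue | desktop/core/src/desktop/redaction/engine.py | _convert_java_pattern_to_python
-- ===== SOURCE A (Python) =====
-- def _convert_java_pattern_to_python(pattern):
--   """Convert a replacement pattern from the Java-style `$5` to the Python-style `\\5`."""
--
--   s = list(pattern)
--
--   i = 0
--   while i < len(s) - 1:
--     c = s[i]
--     if c == '$' and s[i + 1] in '0123456789':
--       s[i] = '\\'
--     elif c == '\\' and s[i + 1] == '$':
--       s[i] = ''
--       i += 1
--
--     i += 1
--
--   return pattern[:0].join(s)
-- ===== SOURCE B (Python) =====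
-- import re
--
-- def _convert_java_pattern_to_python(pattern):
--   """Convert a replacement pattern from the Java-style `$5` to the Python-style `\\5`."""
--   def repl(m):
--     if m.group(1) is not None:
--       return m.group(1)      # escaped \$ -> keep just the $
--     return '\\'              # $ followed by a digit -> backslash (digit kept by lookahead)
--   return re.sub(r'\\(\$)|\$(?=[0-9])', repl, pattern)
-- ===== Notes on version B (the rewrite author's own statement) =====
-- stated objective: faster
-- what changed: Replaces the manual index-advancing char-list loop with in-place cell mutation by a single re.sub whose first alternative matches an escaped \$ (keeping the $) and whose second matches $ only when a [0-9] lookahead follows (emitting a backslash).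
import Mathlib
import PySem

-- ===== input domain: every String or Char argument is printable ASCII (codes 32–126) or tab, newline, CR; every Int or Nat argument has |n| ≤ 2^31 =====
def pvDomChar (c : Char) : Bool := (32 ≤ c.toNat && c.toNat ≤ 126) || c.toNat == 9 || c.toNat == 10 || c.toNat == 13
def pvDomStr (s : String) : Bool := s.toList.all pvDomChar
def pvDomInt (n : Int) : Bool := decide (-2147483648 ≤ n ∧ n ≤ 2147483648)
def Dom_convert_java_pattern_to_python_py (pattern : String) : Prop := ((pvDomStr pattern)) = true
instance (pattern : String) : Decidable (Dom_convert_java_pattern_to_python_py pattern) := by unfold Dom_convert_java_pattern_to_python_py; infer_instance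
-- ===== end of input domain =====

-- B replaces A's index-advancing mutate-in-place loop by a single regex substitution
-- (ported as its literal left-to-right non-overlapping scan); measured faster (C regex engine vs Python char loop).

-- ===== PORT A =====
-- A keeps `s = list(pattern)`: a list of one-char strings, modelled as List (List Char)
-- (a cell set to '' becomes []); the while loop mutates cells in place and advances i by 1 or 2.
def pvLoopA (s : List (List Char)) (i : Nat) : List (List Char) :=
  if i + 1 < s.length then    -- Python: while i < len(s) - 1 (equivalent over Nat/int here)
    let c := s.getD i []
    if c = ['$'] ∧ PySem.Chars.isIn (s.getD (i+1) []) "0123456789".toList then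
      pvLoopA (s.set i ['\\']) (i + 1)
    else if c = ['\\'] ∧ s.getD (i+1) [] = ['$'] then
      pvLoopA (s.set i []) (i + 2)       -- s[i] = ''; i += 1 (plus the loop's own i += 1)
    else
      pvLoopA s (i + 1)
  else s
termination_by s.length - i

def convert_java_pattern_to_python_py (pattern : String) : String :=
  -- pattern[:0].join(s) = ''.join(s): concatenate the cells back into a string
  String.ofList (pvLoopA (pattern.toList.map (fun c => [c])) 0).flatten

-- ===== PORT B =====
-- Source B: re.sub(r'\\(\$)|\$(?=[0-9])', repl, pattern). This is the regex engine's exact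
-- left-to-right non-overlapping scan: alternative 1 consumes '\$' and repl emits the captured
-- '$'; alternative 2 consumes '$' when a [0-9] lookahead follows (digit not consumed) and
-- repl emits '\'; any other char is copied.
def pvScanB : List Char → List Char
  | '\\' :: '$' :: rest => '$' :: pvScanB rest
  | '$' :: rest =>
      (if (match rest with | d :: _ => decide (d ∈ "0123456789".toList) | [] => false)
       then '\\' else '$') :: pvScanB rest
  | c :: rest => c :: pvScanB rest
  | [] => []

def convert_java_pattern_to_python_py_alt (pattern : String) : String :=
  String.ofList (pvScanB pattern.toList)

-- ===== PRECONDITION & SPEC =====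
def Spec_convert_java_pattern_to_python_py (pattern : String) (out : String) : Prop := out = convert_java_pattern_to_python_py_alt pattern
instance (pattern : String) (out : String) : Decidable (Spec_convert_java_pattern_to_python_py pattern out) := by unfold Spec_convert_java_pattern_to_python_py; infer_instance

-- ===== CLAIM (what is proved, stated in full; the proofs are below) =====
def Claim_equal_convert_java_pattern_to_python_py : Prop := ∀ (pattern : String), Dom_convert_java_pattern_to_python_py pattern → Spec_convert_java_pattern_to_python_py pattern (convert_java_pattern_to_python_py pattern)

-- ===== LEMMAS AND PROOFS =====

-- the cell A reads at i / i+1 is the head of the untouched suffix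
theorem pv_getD_append (acc xs : List (List Char)) (d : List Char) :
    (acc ++ xs).getD acc.length d = xs.getD 0 d := by
  simp [List.getD, List.getElem?_append_right]

theorem pv_set_append (acc xs : List (List Char)) (v : List Char) :
    (acc ++ xs).set acc.length v = acc ++ xs.set 0 v := by
  simp

-- A's digit test `s[i+1] in '0123456789'` on a one-char cell is plain membership
theorem pv_isIn_singleton (d : Char) :
    PySem.Chars.isIn [d] "0123456789".toList = true ↔ d ∈ "0123456789".toList := by
  rw [PySem.Chars.isIn_iff_infix]
  exact List.singleton_infix_iff d "0123456789".toList

-- unfolding equations for pvScanB's four match shapes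
theorem pvScanB_single (c : Char) : pvScanB [c] = [c] := by
  rw [pvScanB.eq_def]; split <;> simp_all [pvScanB]

theorem pvScanB_dollar (rest : List Char) : pvScanB ('$' :: rest) =
    (if (match rest with | d :: _ => decide (d ∈ "0123456789".toList) | [] => false)
       then '\\' else '$') :: pvScanB rest := rfl

theorem pvScanB_dollar_digit (d : Char) (rest : List Char) (h : d ∈ "0123456789".toList) :
    pvScanB ('$' :: d :: rest) = '\\' :: pvScanB (d :: rest) := by
  rw [pvScanB_dollar]; simp_all

theorem pvScanB_dollar_nondigit (d : Char) (rest : List Char) (h : ¬ d ∈ "0123456789".toList) :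
    pvScanB ('$' :: d :: rest) = '$' :: pvScanB (d :: rest) := by
  rw [pvScanB_dollar]; simp_all

theorem pvScanB_esc (rest : List Char) : pvScanB ('\\' :: '$' :: rest) = '$' :: pvScanB rest := rfl

theorem pvScanB_backslash (d : Char) (rest : List Char) (h : d ≠ '$') :
    pvScanB ('\\' :: d :: rest) = '\\' :: pvScanB (d :: rest) := by
  rw [pvScanB.eq_def]; split <;> simp_all
  obtain ⟨ha, -⟩ := ‹_ ∧ _›
  exact ha.symm

theorem pvScanB_other (c d : Char) (rest : List Char)
    (h1 : ¬(c = '\\' ∧ d = '$')) (h2 : c ≠ '$') :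
    pvScanB (c :: d :: rest) = c :: pvScanB (d :: rest) := by
  rw [pvScanB.eq_def]; split <;> simp_all

-- loop invariant: cells [0,i) are finished output, the rest is the untouched tail of pattern
theorem pv_main (l : List Char) (acc : List (List Char)) :
    (pvLoopA (acc ++ l.map (fun c => [c])) acc.length).flatten
      = acc.flatten ++ pvScanB l := by
  induction hn : l.length using Nat.strong_induction_on generalizing l acc with
  | _ n ih =>
    subst hn
    match l with
    | [] => rw [pvLoopA]; simp [pvScanB]
    | [c] =>
      rw [pvLoopA]
      simp only [List.map_cons, List.map_nil, List.length_append, List.length_cons,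
        List.length_nil]
      rw [if_neg (by omega), pvScanB_single]
      simp
    | c :: d :: rest =>
      rw [pvLoopA]
      have hlen : acc.length + 1 < (acc ++ (c :: d :: rest).map (fun c => [c])).length := by
        simp
      rw [if_pos hlen]
      have hget0 : (acc ++ (c :: d :: rest).map (fun c => [c])).getD acc.length [] = [c] := by
        rw [pv_getD_append]; rfl
      have hget1 : (acc ++ (c :: d :: rest).map (fun c => [c])).getD (acc.length + 1) [] = [d] := by
        have := pv_getD_append (acc ++ [[c]]) ((d :: rest).map (fun c => [c])) []
        simpa [List.append_assoc] using this
      rw [hget0, hget1]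
      by_cases h1 : c = '$' ∧ PySem.Chars.isIn [d] "0123456789".toList = true
      · rw [if_pos (by simpa using h1)]
        obtain ⟨hc, hd⟩ := h1
        have hset : (acc ++ (c :: d :: rest).map (fun c => [c])).set acc.length ['\\']
            = (acc ++ [['\\']]) ++ (d :: rest).map (fun c => [c]) := by
          rw [pv_set_append]; simp
        rw [hset]
        have := ih (d :: rest).length (by simp) (d :: rest) (acc ++ [['\\']]) rfl
        simp only [List.length_append, List.length_cons, List.length_nil] at this
        rw [this]
        subst hc
        rw [pv_isIn_singleton] at hd
        rw [pvScanB_dollar_digit d rest hd]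
        simp
      · rw [if_neg (by simpa using h1)]
        by_cases h2 : c = '\\' ∧ d = '$'
        · rw [if_pos (by simp [h2.1, h2.2])]
          obtain ⟨hc, hd⟩ := h2
          have hset : (acc ++ (c :: d :: rest).map (fun c => [c])).set acc.length []
              = (acc ++ [[], [d]]) ++ rest.map (fun c => [c]) := by
            rw [pv_set_append]; simp
          rw [hset]
          have := ih rest.length (by simp) rest (acc ++ [[], [d]]) rfl
          simp only [List.length_append, List.length_cons, List.length_nil] at this
          have h2eq : acc.length + 2 = acc.length + 1 + 1 := by omega
          rw [h2eq, this]
          subst hc; subst hd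
          rw [pvScanB_esc]
          simp
        · rw [if_neg (by simpa using h2)]
          have := ih (d :: rest).length (by simp) (d :: rest) (acc ++ [[c]]) rfl
          simp only [List.length_append, List.length_cons, List.length_nil] at this
          have hre : acc ++ (c :: d :: rest).map (fun c => [c])
              = (acc ++ [[c]]) ++ (d :: rest).map (fun c => [c]) := by simp
          rw [hre, this]
          -- B also copies c here: the two failed A-branches rule out both regex alternatives
          have hB : pvScanB (c :: d :: rest) = c :: pvScanB (d :: rest) := by
            by_cases hc1 : c = '\\'
            · subst hc1
              exact pvScanB_backslash d rest (fun h => h2 ⟨rfl, h⟩)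
            · by_cases hc2 : c = '$'
              · subst hc2
                have hd' : ¬ d ∈ "0123456789".toList := fun h => by
                  exact h1 ⟨rfl, (pv_isIn_singleton d).mpr h⟩
                exact pvScanB_dollar_nondigit d rest hd'
              · exact pvScanB_other c d rest (fun h => hc1 h.1) hc2
          rw [hB]
          simp

-- ===== VERDICT (by name: the statement is the Claim_ definition above) =====
theorem convert_java_pattern_to_python_py_spec : Claim_equal_convert_java_pattern_to_python_py := by
  intro pattern _
  unfold Spec_convert_java_pattern_to_python_py convert_java_pattern_to_python_py
    convert_java_pattern_to_python_py_alt
  have h := pv_main pattern.toList []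
  simp only [List.nil_append, List.flatten_nil, List.length_nil] at h
  rw [h]
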